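-- pv_equiv track=rewrite | github.com/KrushnaSonwane/LeetCode-Solutions | 2207-maximize-number-of-subsequences-in-a-string/2207-maximize-number-of-subsequences-in-a-string.py | maximumSubsequenceCount
-- ===== SOURCE A (Python) =====
-- def maximumSubsequenceCount(text: str, p: str) -> int:
--     x, y = text.count(p[0]), text.count(p[1])
--     res, a = y, y
--     for ch in text:
--         a -= ch == p[1]
--         if ch == p[0]:
--             res += a
--     res2, a = x, x
--     for ch in text[::-1]:
--         a -= ch == p[0]
--         if ch == p[1]:
--             res2 += a
--     return max(res, res2)
-- ===== SOURCE B (Python) =====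
-- def maximumSubsequenceCount(text: str, p: str) -> int:
--     p0, p1 = p[0], p[1]
--     c0 = base = 0
--     for ch in text:
--         if ch == p1:
--             base += c0
--         if ch == p0:
--             c0 += 1
--     return base + max(text.count(p0), text.count(p1))
-- ===== Notes on version B (the rewrite author's own statement) =====
-- stated objective: faster
-- what changed: One forward pass with a running count of p[0] accumulates the pair count once (add-before-increment handles p[0]==p[1]), then returns base + max of the two character counts, replacing A's two symmetric forward/backward subsequence scans (one over a reversed copy of text) and max of two full subsequence sums.
import Mathlib
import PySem

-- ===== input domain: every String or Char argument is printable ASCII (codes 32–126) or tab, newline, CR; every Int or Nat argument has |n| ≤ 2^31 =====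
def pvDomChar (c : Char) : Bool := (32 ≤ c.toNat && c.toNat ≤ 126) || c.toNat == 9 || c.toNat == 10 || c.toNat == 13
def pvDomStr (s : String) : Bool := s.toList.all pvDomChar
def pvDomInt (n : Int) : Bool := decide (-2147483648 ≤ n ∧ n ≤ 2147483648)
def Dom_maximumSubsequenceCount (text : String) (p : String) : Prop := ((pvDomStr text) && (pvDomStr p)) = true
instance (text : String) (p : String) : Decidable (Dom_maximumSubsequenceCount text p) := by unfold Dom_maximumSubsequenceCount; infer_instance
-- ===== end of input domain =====

-- B replaces A's two symmetric forward/backward subsequence scans by one pair-counting pass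
-- plus max of the two character counts (objective: simpler).


-- ===== PORT A =====
-- step of A's loops: 'a -= ch == q; if ch == add: res += a' (first loop: add = p[0], q = p[1];
-- second loop the roles are swapped, exactly as in the Python)
def stepA (q add : Char) (s : Int × Int) (ch : Char) : Int × Int :=
  let a := s.2 - (if ch = q then 1 else 0)
  (if ch = add then s.1 + a else s.1, a)

def maximumSubsequenceCount (text : String) (p : String) : Int :=
  match PySem.Str.pyGet? p 0, PySem.Str.pyGet? p 1 with
  | some p0, some p1 =>
    -- text.count(p[0]) / text.count(p[1]) (single-character needle = character count)
    let x : Int := (text.toList.count p0 : Int)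
    let y : Int := (text.toList.count p1 : Int)
    let s1 := text.toList.foldl (stepA p1 p0) (y, y)
    -- text[::-1] = reverse (PySem.List.slice?_none_none_neg_one)
    let s2 := text.toList.reverse.foldl (stepA p0 p1) (x, x)
    max s1.1 s2.1
  | _, _ => 0  -- p[0] / p[1] raises IndexError: excluded by Pre_

-- ===== PORT B =====
-- state (c0, base): 'if ch == p1: base += c0' then 'if ch == p0: c0 += 1'
def stepB (p0 p1 : Char) (s : Int × Int) (ch : Char) : Int × Int :=
  let base := if ch = p1 then s.2 + s.1 else s.2
  let c0 := if ch = p0 then s.1 + 1 else s.1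
  (c0, base)

def maximumSubsequenceCount_alt (text : String) (p : String) : Int :=
  match PySem.Str.pyGet? p 0 with
  | none => 0  -- p[0] raises IndexError: excluded by Pre_
  | some p0 =>
    match PySem.Str.pyGet? p 1 with
    | none => 0  -- p[1] raises IndexError: excluded by Pre_
    | some p1 =>
      let s := text.toList.foldl (stepB p0 p1) (0, 0)
      s.2 + max (text.toList.count p0 : Int) (text.toList.count p1 : Int)

-- ===== PRECONDITION & SPEC =====
-- Pre_ excludes exactly the inputs where Python A raises IndexError on p[1] (or p[0]): len(p) < 2.
def Pre_maximumSubsequenceCount (text : String) (p : String) : Prop := 2 ≤ p.toList.length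
instance (text : String) (p : String) : Decidable (Pre_maximumSubsequenceCount text p) := by unfold Pre_maximumSubsequenceCount; infer_instance
def pvWitness_maximumSubsequenceCount : String × String := ("abbab", "ab")

def Spec_maximumSubsequenceCount (text : String) (p : String) (out : Int) : Prop := out = maximumSubsequenceCount_alt text p
instance (text : String) (p : String) (out : Int) : Decidable (Spec_maximumSubsequenceCount text p out) := by unfold Spec_maximumSubsequenceCount; infer_instance

-- ===== CLAIM (what is proved, stated in full; the proofs are below) =====
def Claim_equal_maximumSubsequenceCount : Prop := ∀ (text : String) (p : String), Dom_maximumSubsequenceCount text p → Pre_maximumSubsequenceCount text p → Spec_maximumSubsequenceCount text p (maximumSubsequenceCount text p)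

-- ===== LEMMAS AND PROOFS =====

-- number of pairs (i < j) with l[i] = p0 and l[j] = p1
def pairs (p0 p1 : Char) : List Char → Int
  | [] => 0
  | c :: t => (if c = p0 then (t.count p1 : Int) else 0) + pairs p0 p1 t

theorem foldA_eq (p0 p1 : Char) (l : List Char) : ∀ r : Int,
    (l.foldl (stepA p1 p0) (r, (l.count p1 : Int))).1 = r + pairs p0 p1 l := by
  induction l with
  | nil => intro r; simp [pairs]
  | cons c t ih =>
    intro r
    have ha : ((List.count p1 (c :: t) : Int) - (if c = p1 then 1 else 0)) = (t.count p1 : Int) := by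
      by_cases h : c = p1 <;> simp [h]
    simp only [List.foldl_cons, stepA]
    rw [ha, ih]
    simp only [pairs]
    split_ifs <;> ring

theorem foldB_eq (p0 p1 : Char) (l : List Char) : ∀ c b : Int,
    (l.foldl (stepB p0 p1) (c, b)).2 = b + c * (l.count p1 : Int) + pairs p0 p1 l := by
  induction l with
  | nil => intro c b; simp [pairs]
  | cons ch t ih =>
    intro c b
    simp only [List.foldl_cons, stepB, ih, pairs, List.count_cons, beq_iff_eq]
    split_ifs <;> push_cast <;> first | ring | (exfalso; simp_all)

theorem pairs_append (p0 p1 : Char) (l1 l2 : List Char) :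
    pairs p0 p1 (l1 ++ l2)
      = pairs p0 p1 l1 + (l1.count p0 : Int) * (l2.count p1 : Int) + pairs p0 p1 l2 := by
  induction l1 with
  | nil => simp [pairs]
  | cons c t ih =>
    simp only [List.cons_append, pairs, List.count_append, List.count_cons, ih, beq_iff_eq]
    split_ifs <;> push_cast <;> ring

theorem pairs_reverse (p0 p1 : Char) (l : List Char) :
    pairs p1 p0 l.reverse = pairs p0 p1 l := by
  induction l with
  | nil => simp [pairs]
  | cons c t ih =>
    simp only [List.reverse_cons, pairs_append, ih, pairs, List.count_reverse,
      List.count_singleton, List.count_nil, beq_iff_eq]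
    split_ifs <;> push_cast <;> ring

-- A's second loop (over text[::-1], roles of p0/p1 swapped) in the form the port uses
theorem foldA_rev (p0 p1 : Char) (l : List Char) :
    (l.reverse.foldl (stepA p0 p1) ((l.count p0 : Int), (l.count p0 : Int))).1
      = (l.count p0 : Int) + pairs p0 p1 l := by
  have h := foldA_eq p1 p0 l.reverse ((l.count p0 : Int))
  simpa [List.count_reverse, pairs_reverse] using h

-- ===== VERDICT (by name: the statement is the Claim_ definition above) =====
theorem maximumSubsequenceCount_spec : Claim_equal_maximumSubsequenceCount := by
  intro text p _ hpre
  unfold Spec_maximumSubsequenceCount maximumSubsequenceCount maximumSubsequenceCount_alt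
  unfold Pre_maximumSubsequenceCount at hpre
  rcases hl : p.toList with _ | ⟨p0, t0⟩
  · rw [hl] at hpre; simp at hpre
  rcases t0 with _ | ⟨p1, t⟩
  · rw [hl] at hpre; simp at hpre
  simp only [PySem.Str.pyGet?_eq, hl, PySem.Chars.pyGet?_eq_listPyGet?,
    PySem.List.pyGet?_zero_cons]
  rw [show PySem.List.pyGet? (p0 :: p1 :: t) 1 = some p1 from by
    simpa using PySem.List.pyGet?_cons_succ (x := p0) (xs := p1 :: t) (n := 0)]
  simp only [foldA_eq, foldA_rev, foldB_eq]
  omega
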